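-- pv_equiv track=rewrite | github.com/gskundi87/Python_Projects | sorts.py | find_median_iter
-- ===== SOURCE A (Python) =====
-- def bubble_sort_ip(x,p,r):
--     for i in range(p,r):
--         for j in range(p,r-i):
--             if x[j] > x[j+1]:
--                 x[j],x[j+1] = x[j+1],x[j]
--     return x
--
-- def find_median_iter(B,p,r):
--     lenB = r - p + 1
--     if lenB <= 5:
--         return get_median_small_list(B,p,r)
--     else:
--         g = ((lenB//5) if (lenB % 5 == 0) else ((lenB//5) + 1))
--         temp = []
--         for x in range(g-1):
--             i = p+(5*x)
--             temp.append(get_median_small_list(B,i,i+4))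
--         temp.append(get_median_small_list(B,p+(5*(g-1)),r))
--         B1 = temp
--
--         lenB1 = len(B1)
--         while(lenB1 > 5):
--             g = ((lenB1//5) if (lenB1 % 5 == 0) else ((lenB1//5) + 1))
--             temp = []
--             for x in range(g-1):
--                 i = 5*x
--                 temp.append(get_median_small_list(B1,i,i+4))
--             temp.append(get_median_small_list(B1,(5*(g-1)),lenB1-1))
--             B1 = temp
--             lenB1 = len(B1)
--
--         return get_median_small_list(B1,0,lenB1-1)
--
-- def get_median_small_list(B,p,r):
--     lenB = r - p + 1
--     if lenB == 1 or lenB == 2: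
--         return B[p]
--     bubble_sort_ip(B,p,r)
--     return B[p+1]
-- ===== SOURCE B (Python) =====
-- def bubble_sort_ip(x,p,r):
--     for i in range(p,r):
--         for j in range(p,r-i):
--             if x[j] > x[j+1]:
--                 x[j],x[j+1] = x[j+1],x[j]
--     return x
--
-- def get_median_small_list(B,p,r):
--     lenB = r - p + 1
--     if lenB == 1 or lenB == 2:
--         return B[p]
--     bubble_sort_ip(B,p,r)
--     return B[p+1]
--
-- def find_median_iter(B,p,r):
--     # recursive median-of-medians: recurse on the fresh medians list
--     lenB = r - p + 1
--     if lenB <= 5: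
--         return get_median_small_list(B,p,r)
--     g = (lenB//5) if (lenB % 5 == 0) else (lenB//5) + 1
--     medians = []
--     for x in range(g-1):
--         i = p + 5*x
--         medians.append(get_median_small_list(B,i,i+4))
--     medians.append(get_median_small_list(B,p+5*(g-1),r))
--     return find_median_iter(medians, 0, len(medians)-1)
-- ===== Notes on version B (the rewrite author's own statement) =====
-- stated objective: simpler
-- what changed: The explicit while-loop that repeatedly shrinks the medians list is replaced by direct recursion of find_median_iter on the fresh medians list, so one grouping pass plus a recursive call replaces the first-pass loop, the while loop, and the separate exit call.
import Mathlib
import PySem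

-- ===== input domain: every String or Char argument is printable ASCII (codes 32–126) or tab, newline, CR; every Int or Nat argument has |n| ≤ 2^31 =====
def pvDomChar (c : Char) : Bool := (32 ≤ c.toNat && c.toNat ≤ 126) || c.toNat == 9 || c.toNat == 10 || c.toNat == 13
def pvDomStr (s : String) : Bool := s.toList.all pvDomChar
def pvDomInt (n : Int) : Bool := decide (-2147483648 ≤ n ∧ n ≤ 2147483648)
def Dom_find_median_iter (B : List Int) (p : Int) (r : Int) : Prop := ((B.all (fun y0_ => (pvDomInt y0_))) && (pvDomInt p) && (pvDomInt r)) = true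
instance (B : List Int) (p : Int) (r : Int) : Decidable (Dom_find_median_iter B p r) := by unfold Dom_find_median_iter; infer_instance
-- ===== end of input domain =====

-- B replaces A's explicit while-loop reduction over the medians list by direct recursion
-- of find_median_iter on the fresh medians list (objective: simpler decomposition, same cost).
-- A mutates its list argument B in place (bubble-sorts groups); B performs the identical
-- mutation, and the equivalence proved here is about the return value.

-- ===== PORT A =====
-- bubble_sort_ip: lists are immutable in Lean, so the mutated list is returned
def pvBubbleSort (x : List Int) (p r : Int) : List Int :=
  (PySem.List.pyRange p r 1).foldl (fun x i =>
    (PySem.List.pyRange p (r - i) 1).foldl (fun x j =>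
      let a := PySem.List.pyGetD x j 0
      let b := PySem.List.pyGetD x (j+1) 0
      if a > b then PySem.List.pySetD (PySem.List.pySetD x j b) (j+1) a else x) x) x

-- get_median_small_list: returns (mutated list, returned median)
def pvGms (B : List Int) (p r : Int) : List Int × Int :=
  let lenB := r - p + 1
  if lenB = 1 ∨ lenB = 2 then (B, PySem.List.pyGetD B p 0)
  else
    let B' := pvBubbleSort B p r
    (B', PySem.List.pyGetD B' (p+1) 0)

-- length of a fold that appends exactly one element to the second component per step
theorem pvFoldLen {σ : Type} (step : σ × List Int → Int → σ × List Int)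
    (h : ∀ st x, ((step st x).2).length = st.2.length + 1) :
    ∀ (l : List Int) (st : σ × List Int), ((l.foldl step st).2).length = st.2.length + l.length := by
  intro l
  induction l with
  | nil => intro st; simp
  | cons a l ih => intro st; simp [List.foldl_cons, ih (step st a), h st a]; omega

-- number of groups g = ceil(L/5): at least 2 and strictly below L once L > 5
theorem pvGBounds (L : Int) (h : 5 < L) :
    2 ≤ (if PySem.Int.mod L 5 = 0 then PySem.Int.floordiv L 5 else PySem.Int.floordiv L 5 + 1) ∧
    (if PySem.Int.mod L 5 = 0 then PySem.Int.floordiv L 5 else PySem.Int.floordiv L 5 + 1) < L := by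
  rw [PySem.Int.floordiv_eq_ediv_of_pos (by omega : (0:Int) < 5),
      PySem.Int.mod_eq_emod_of_pos (by omega : (0:Int) < 5)]
  split_ifs with h0 <;> omega

-- decreasing-measure lemmas cited by the termination proofs of the loop/recursion below
theorem pvDecA {σ : Type} (step : σ × List Int → Int → σ × List Int)
    (h : ∀ st x, ((step st x).2).length = st.2.length + 1)
    (init : σ) (x g : Int) (n : Nat) (h2 : 2 ≤ g) (h3 : g < (n : Int)) :
    ((((PySem.List.pyRange 0 (g-1) 1).foldl step (init, ([] : List Int))).2) ++ [x]).length < n := by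
  have hl := pvFoldLen step h (PySem.List.pyRange 0 (g-1) 1) (init, ([] : List Int))
  simp only [PySem.List.length_pyRange_one, List.length_nil, Nat.zero_add] at hl
  simp only [List.length_append, List.length_singleton, hl]
  omega

theorem pvDecB {σ : Type} (step : σ × List Int → Int → σ × List Int)
    (h : ∀ st x, ((step st x).2).length = st.2.length + 1)
    (init : σ) (x g L : Int) (h2 : 2 ≤ g) (h3 : g < L) :
    ((((((PySem.List.pyRange 0 (g-1) 1).foldl step (init, ([] : List Int))).2) ++ [x]).length : Int) - 1 - 0 + 1).toNat < L.toNat := by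
  have hl := pvFoldLen step h (PySem.List.pyRange 0 (g-1) 1) (init, ([] : List Int))
  simp only [PySem.List.length_pyRange_one, List.length_nil, Nat.zero_add] at hl
  simp only [List.length_append, List.length_singleton, hl]
  omega

theorem pvStepLen {σ : Type} (f : σ × List Int → Int → σ × Int) :
    ∀ (st : σ × List Int) (x : Int), ((((f st x).1, st.2 ++ [(f st x).2]) : σ × List Int).2).length = st.2.length + 1 := by
  intro st x; simp

-- the while-loop over B1 in A, as well-founded recursion on the list length
def pvLoopA (B1 : List Int) : Int :=
  let lenB1 : Int := B1.length
  if lenB1 > 5 then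
    let g := if PySem.Int.mod lenB1 5 = 0 then PySem.Int.floordiv lenB1 5
             else PySem.Int.floordiv lenB1 5 + 1
    let st := (PySem.List.pyRange 0 (g-1) 1).foldl (fun st x =>
        let i := 5*x
        let m := pvGms st.1 i (i+4)
        (m.1, st.2 ++ [m.2])) (B1, ([] : List Int))
    let last := pvGms st.1 (5*(g-1)) (lenB1 - 1)
    pvLoopA (st.2 ++ [last.2])
  else (pvGms B1 0 (lenB1 - 1)).2
termination_by B1.length
decreasing_by
  rename_i hgt
  simp only [dite_eq_ite]
  exact pvDecA _ (pvStepLen (fun st x => (pvGms st.1 (5*x) (5*x+4)))) _ _ _ _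
    (pvGBounds ((B1.length : Int)) hgt).1 (pvGBounds ((B1.length : Int)) hgt).2

def find_median_iter (B : List Int) (p : Int) (r : Int) : Int :=
  let lenB := r - p + 1
  if lenB ≤ 5 then (pvGms B p r).2
  else
    let g := if PySem.Int.mod lenB 5 = 0 then PySem.Int.floordiv lenB 5
             else PySem.Int.floordiv lenB 5 + 1
    let st := (PySem.List.pyRange 0 (g-1) 1).foldl (fun st x =>
        let i := p + 5*x
        let m := pvGms st.1 i (i+4)
        (m.1, st.2 ++ [m.2])) (B, ([] : List Int))
    let last := pvGms st.1 (p + 5*(g-1)) r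
    pvLoopA (st.2 ++ [last.2])

-- ===== PORT B =====
def find_median_iter_alt (B : List Int) (p : Int) (r : Int) : Int :=
  let lenB := r - p + 1
  if lenB ≤ 5 then (pvGms B p r).2
  else
    let g := if PySem.Int.mod lenB 5 = 0 then PySem.Int.floordiv lenB 5
             else PySem.Int.floordiv lenB 5 + 1
    let st := (PySem.List.pyRange 0 (g-1) 1).foldl (fun st x =>
        let i := p + 5*x
        let m := pvGms st.1 i (i+4)
        (m.1, st.2 ++ [m.2])) (B, ([] : List Int))
    let last := pvGms st.1 (p + 5*(g-1)) r
    let medians := st.2 ++ [last.2]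
    find_median_iter_alt medians 0 ((medians.length : Int) - 1)
termination_by (r - p + 1).toNat
decreasing_by
  rename_i hgt
  simp only [dite_eq_ite]
  exact pvDecB _ (pvStepLen (fun st x => (pvGms st.1 (p+5*x) (p+5*x+4)))) _ _ _ _
    (pvGBounds (r - p + 1) (by omega)).1 (pvGBounds (r - p + 1) (by omega)).2

-- ===== PRECONDITION & SPEC =====
-- Pre_ holds exactly when Python A returns normally: every list index the routine
-- touches (bubble-sort swaps over [p, r-p] when that inner range is nonempty, and the
-- reads B[p] / B[p+1] of each group of the first pass) is a valid Python index of B.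
def pvInR (n i : Int) : Bool := decide (-n ≤ i) && decide (i < n)
def pvSortOk (n p r : Int) : Bool :=
  !(decide (p < r) && decide (2*p < r)) || (decide (-n ≤ p) && decide (r - p < n))
def pvGmsOk (n p r : Int) : Bool :=
  if r - p + 1 = 1 ∨ r - p + 1 = 2 then pvInR n p
  else pvSortOk n p r && pvInR n (p+1)
def Pre_find_median_iter (B : List Int) (p : Int) (r : Int) : Prop :=
  (if r - p + 1 ≤ 5 then pvGmsOk (B.length : Int) p r
   else
     let g : Int := if PySem.Int.mod (r - p + 1) 5 = 0 then PySem.Int.floordiv (r - p + 1) 5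
        else PySem.Int.floordiv (r - p + 1) 5 + 1
     (List.range (g-1).toNat).all (fun x => pvGmsOk (B.length : Int) (p + 5*(x : Int)) (p + 5*(x : Int) + 4)) &&
       pvGmsOk (B.length : Int) (p + 5*(g-1)) r) = true
instance (B : List Int) (p : Int) (r : Int) : Decidable (Pre_find_median_iter B p r) := by
  unfold Pre_find_median_iter; infer_instance

def pvWitness_find_median_iter : List Int × Int × Int := ([3, 1, 2, 9, 4, 7, 5], 0, 6)

def Spec_find_median_iter (B : List Int) (p : Int) (r : Int) (out : Int) : Prop := out = find_median_iter_alt B p r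
instance (B : List Int) (p : Int) (r : Int) (out : Int) : Decidable (Spec_find_median_iter B p r out) := by unfold Spec_find_median_iter; infer_instance

-- ===== CLAIM (what is proved, stated in full; the proofs are below) =====
def Claim_equal_find_median_iter : Prop := ∀ (B : List Int) (p : Int) (r : Int), Dom_find_median_iter B p r → Pre_find_median_iter B p r → Spec_find_median_iter B p r (find_median_iter B p r)

-- ===== LEMMAS AND PROOFS =====

-- A's while loop over the medians list computes exactly B's recursion on it
theorem pvLoop_eq_alt : ∀ (n : Nat) (M : List Int), M.length = n →
    pvLoopA M = find_median_iter_alt M 0 ((M.length : Int) - 1) := by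
  intro n
  induction n using Nat.strong_induction_on with
  | _ n ih =>
    intro M hM
    rw [pvLoopA, find_median_iter_alt]
    have harith : (M.length : Int) - 1 - 0 + 1 = (M.length : Int) := by ring
    simp only [harith]
    by_cases h5 : (M.length : Int) > 5
    · simp only [if_pos h5, if_neg (by omega : ¬ (M.length : Int) ≤ 5), zero_add]
      set g : Int := if PySem.Int.mod (M.length : Int) 5 = 0 then PySem.Int.floordiv (M.length : Int) 5
             else PySem.Int.floordiv (M.length : Int) 5 + 1 with hg
      set st := (PySem.List.pyRange 0 (g-1) 1).foldl (fun st x =>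
          ((pvGms st.1 (5*x) (5*x+4)).1, st.2 ++ [(pvGms st.1 (5*x) (5*x+4)).2])) (M, ([] : List Int)) with hst
      set med := st.2 ++ [(pvGms st.1 (5*(g-1)) ((M.length : Int) - 1)).2] with hmed
      have hlen := pvFoldLen (σ := List Int)
        (fun st x => ((pvGms st.1 (5*x) (5*x+4)).1, st.2 ++ [(pvGms st.1 (5*x) (5*x+4)).2]))
        (by intro st x; simp) (PySem.List.pyRange 0 (g-1) 1) (M, ([] : List Int))
      have hmlen : med.length < M.length := by
        rw [hmed]
        simp only [List.length_append, List.length_singleton]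
        rw [← hst, hlen] at *
        simp only [List.length_nil, PySem.List.length_pyRange_one, Nat.zero_add] at *
        obtain ⟨h2, h3⟩ := pvGBounds ((M.length : Int)) h5
        rw [← hg] at h2 h3
        omega
      exact ih med.length (by omega) med rfl
    · simp only [if_neg h5, if_pos (by omega : (M.length : Int) ≤ 5)]

-- ===== VERDICT (by name: the statement is the Claim_ definition above) =====
theorem find_median_iter_spec : Claim_equal_find_median_iter := by
  intro B p r _ _
  unfold Spec_find_median_iter find_median_iter
  rw [find_median_iter_alt]
  by_cases h5 : r - p + 1 ≤ 5
  · simp only [if_pos h5]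
  · simp only [if_neg h5]
    exact pvLoop_eq_alt _ _ rfl
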